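-- pv_equiv track=rewrite | github.com/rugg0064/UpdatedPiqueserverScripts | WE2.py | getCuboidPositions
-- ===== SOURCE A (Python) =====
-- def getCuboidPositions(pos1, pos2):
--     pos1, pos2 = sort_positions(pos1, pos2)
--     positions = []
--     for x in range(pos1[0],pos2[0]+1):
--         for y in range(pos1[1],pos2[1]+1):
--             for z in range(pos1[2],pos2[2]+1):
--                 positions.append( (x,y,z) )
--     return positions
--
-- def sort_positions(pos1, pos2):
--     x1, y1, z1 = pos1
--     x2, y2, z2 = pos2
--     nx1 = min(x1, x2)
--     nx2 = max(x1, x2)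
--     ny1 = min(y1, y2)
--     ny2 = max(y1, y2)
--     nz1 = min(z1, z2)
--     nz2 = max(z1, z2)
--     return ((nx1, ny1, nz1),(nx2, ny2, nz2))
-- ===== SOURCE B (Python) =====
-- def getCuboidPositions(pos1, pos2):
--     x1, y1, z1 = pos1
--     x2, y2, z2 = pos2
--     xlo = min(x1, x2)
--     ylo = min(y1, y2)
--     zlo = min(z1, z2)
--     dx = abs(x1 - x2) + 1
--     dy = abs(y1 - y2) + 1
--     dz = abs(z1 - z2) + 1
--     total = dx * dy * dz
--     return [(xlo + i // (dy * dz), ylo + (i // dz) % dy, zlo + i % dz)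
--             for i in range(total)]
-- ===== Notes on version B (the rewrite author's own statement) =====
-- stated objective: alternative
-- what changed: Replaces the three nested range loops (after the min/max sort step) by a single flat loop over range(dx*dy*dz) that decodes each index into the three coordinate offsets with // and %.
import Mathlib
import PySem

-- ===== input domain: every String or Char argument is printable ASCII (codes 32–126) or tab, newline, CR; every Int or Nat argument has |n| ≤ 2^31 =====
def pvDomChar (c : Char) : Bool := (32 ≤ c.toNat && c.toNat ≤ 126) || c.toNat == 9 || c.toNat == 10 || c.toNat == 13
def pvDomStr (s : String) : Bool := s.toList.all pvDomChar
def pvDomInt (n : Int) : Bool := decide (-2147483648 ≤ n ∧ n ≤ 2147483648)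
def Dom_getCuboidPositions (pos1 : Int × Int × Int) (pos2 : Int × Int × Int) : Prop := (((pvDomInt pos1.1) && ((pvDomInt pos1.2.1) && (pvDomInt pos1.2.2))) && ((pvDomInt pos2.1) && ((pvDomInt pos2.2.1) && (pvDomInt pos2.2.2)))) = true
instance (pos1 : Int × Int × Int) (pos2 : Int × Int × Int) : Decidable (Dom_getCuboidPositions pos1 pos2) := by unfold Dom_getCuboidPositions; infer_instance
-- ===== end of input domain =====

-- B replaces A's three nested coordinate loops by one flat loop over range(dx*dy*dz)
-- that decodes each index into the three offsets with // and % (alternative decomposition, same cost).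


-- ===== PORT A =====
def sortPositions (pos1 : Int × Int × Int) (pos2 : Int × Int × Int) :
    (Int × Int × Int) × (Int × Int × Int) :=
  let x1 := pos1.1; let y1 := pos1.2.1; let z1 := pos1.2.2
  let x2 := pos2.1; let y2 := pos2.2.1; let z2 := pos2.2.2
  ((min x1 x2, min y1 y2, min z1 z2), (max x1 x2, max y1 y2, max z1 z2))

def getCuboidPositions (pos1 : Int × Int × Int) (pos2 : Int × Int × Int) : List (Int × Int × Int) :=
  let s := sortPositions pos1 pos2
  let p1 := s.1
  let p2 := s.2
  -- positions = [] … positions.append((x,y,z)): a Python list is a dynamic array; append = Array.push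
  let positions : Array (Int × Int × Int) := #[]
  ((PySem.List.pyRange p1.1 (p2.1 + 1)).foldl (fun positions x =>
    (PySem.List.pyRange p1.2.1 (p2.2.1 + 1)).foldl (fun positions y =>
      (PySem.List.pyRange p1.2.2 (p2.2.2 + 1)).foldl (fun positions z =>
        positions.push (x, y, z)) positions) positions) positions).toList

-- ===== PORT B =====
def getCuboidPositions_alt (pos1 : Int × Int × Int) (pos2 : Int × Int × Int) : List (Int × Int × Int) :=
  let xlo := min pos1.1 pos2.1
  let ylo := min pos1.2.1 pos2.2.1
  let zlo := min pos1.2.2 pos2.2.2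
  let dx : Int := |pos1.1 - pos2.1| + 1
  let dy : Int := |pos1.2.1 - pos2.2.1| + 1
  let dz : Int := |pos1.2.2 - pos2.2.2| + 1
  let total := dx * dy * dz
  (PySem.List.pyRange 0 total).map (fun i =>
    (xlo + PySem.Int.floordiv i (dy * dz),
     ylo + PySem.Int.mod (PySem.Int.floordiv i dz) dy,
     zlo + PySem.Int.mod i dz))

-- ===== PRECONDITION & SPEC =====
def Spec_getCuboidPositions (pos1 : Int × Int × Int) (pos2 : Int × Int × Int) (out : List (Int × Int × Int)) : Prop := out = getCuboidPositions_alt pos1 pos2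
instance (pos1 : Int × Int × Int) (pos2 : Int × Int × Int) (out : List (Int × Int × Int)) : Decidable (Spec_getCuboidPositions pos1 pos2 out) := by unfold Spec_getCuboidPositions; infer_instance

-- ===== CLAIM (what is proved, stated in full; the proofs are below) =====
def Claim_equal_getCuboidPositions : Prop := ∀ (pos1 : Int × Int × Int) (pos2 : Int × Int × Int), Dom_getCuboidPositions pos1 pos2 → Spec_getCuboidPositions pos1 pos2 (getCuboidPositions pos1 pos2)

-- ===== LEMMAS AND PROOFS =====

-- a fold that appends blocks to a dynamic array, read back as a list
lemma arr_foldl_toList {A B : Type} (l : List B) (F : Array A -> B -> Array A) (f : B -> List A)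
    (h : ∀ (a : Array A) (x : B), (F a x).toList = a.toList ++ f x) (a : Array A) :
    (l.foldl F a).toList = a.toList ++ l.flatMap f := by
  induction l generalizing a with
  | nil => simp
  | cons x xs ih => simp [ih, h, List.append_assoc]

-- pyRange over [lo, lo+n) as a mapped Nat range
lemma pyRange_map_range (lo : Int) (n : Nat) :
    PySem.List.pyRange lo (lo + n) = (List.range n).map (fun (k : Nat) => lo + (k : Int)) := by
  induction n with
  | zero => simp [PySem.List.pyRange]
  | succ n ih =>
    have h : lo + ((n + 1 : Nat) : Int) = (lo + n) + 1 := by push_cast; ring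
    rw [h, PySem.List.pyRange_one_succ_right (by omega), ih, List.range_succ]
    simp

-- a flat Nat range over m*n as a flatMap of quotient/remainder blocks
lemma map_range_mul {A : Type} (m n : Nat) (f : Nat -> A) :
    (List.range (m * n)).map f
      = (List.range m).flatMap (fun q => (List.range n).map (fun r => f (q * n + r))) := by
  induction m with
  | zero => simp
  | succ m ih =>
    rw [Nat.succ_mul, List.range_add, List.map_append, ih, List.range_succ, List.flatMap_append]
    simp [List.map_map, Function.comp_def]

-- the index-decode of B's flat loop equals A's three nested Nat ranges
lemma cuboid_core (xlo ylo zlo : Int) (Dx Dy Dz : Nat) :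
    (List.range (Dx * Dy * Dz)).map (fun (k : Nat) =>
        ((xlo + ((k / (Dy * Dz) : Nat) : Int),
          ylo + (((k / Dz) % Dy : Nat) : Int),
          zlo + ((k % Dz : Nat) : Int)) : Int × Int × Int))
      = (List.range Dx).flatMap (fun (a : Nat) => (List.range Dy).flatMap (fun (b : Nat) =>
          (List.range Dz).map (fun (c : Nat) =>
            ((xlo + (a : Int), ylo + (b : Int), zlo + (c : Int)) : Int × Int × Int)))) := by
  rw [Nat.mul_assoc, map_range_mul]
  apply List.flatMap_congr
  intro q _
  have hstep :
      (List.range (Dy * Dz)).map (fun (r : Nat) =>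
          ((xlo + (((q * (Dy * Dz) + r) / (Dy * Dz) : Nat) : Int),
            ylo + ((((q * (Dy * Dz) + r) / Dz) % Dy : Nat) : Int),
            zlo + (((q * (Dy * Dz) + r) % Dz : Nat) : Int)) : Int × Int × Int))
        = (List.range (Dy * Dz)).map (fun (r : Nat) =>
            ((xlo + (q : Int),
              ylo + (((r / Dz) % Dy : Nat) : Int),
              zlo + ((r % Dz : Nat) : Int)) : Int × Int × Int)) := by
    apply List.map_congr_left
    intro r hrmem
    have hrlt : r < Dy * Dz := List.mem_range.mp hrmem
    have hpos : 0 < Dy * Dz := by omega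
    have hdz : 0 < Dz := by
      rcases Nat.eq_zero_or_pos Dz with h | h
      · rw [h, Nat.mul_zero] at hrlt; omega
      · exact h
    have e1 : (q * (Dy * Dz) + r) / (Dy * Dz) = q := by
      rw [Nat.mul_comm q (Dy * Dz), Nat.mul_add_div hpos, Nat.div_eq_of_lt hrlt, Nat.add_zero]
    have e2 : (q * (Dy * Dz) + r) / Dz = q * Dy + r / Dz := by
      have hq : q * (Dy * Dz) = Dz * (q * Dy) := by ring
      rw [hq, Nat.mul_add_div hdz]
    have e3 : (q * Dy + r / Dz) % Dy = (r / Dz) % Dy := by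
      rw [Nat.add_comm, Nat.add_mul_mod_self_right]
    have e4 : (q * (Dy * Dz) + r) % Dz = r % Dz := by
      have hq : q * (Dy * Dz) = Dz * (q * Dy) := by ring
      rw [hq, Nat.mul_add_mod]
    rw [e1, e2, e3, e4]
  rw [hstep, map_range_mul]
  apply List.flatMap_congr
  intro b hbmem
  have hb : b < Dy := List.mem_range.mp hbmem
  apply List.map_congr_left
  intro c hcmem
  have hc : c < Dz := List.mem_range.mp hcmem
  have hdz : 0 < Dz := by omega
  have f1 : (b * Dz + c) / Dz = b := by
    rw [Nat.mul_comm b Dz, Nat.mul_add_div hdz, Nat.div_eq_of_lt hc, Nat.add_zero]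
  have f2 : (b * Dz + c) % Dz = c := by
    rw [Nat.mul_comm b Dz, Nat.mul_add_mod, Nat.mod_eq_of_lt hc]
  rw [f1, f2, Nat.mod_eq_of_lt hb]

-- ===== VERDICT (by name: the statement is the Claim_ definition above) =====
theorem getCuboidPositions_spec : Claim_equal_getCuboidPositions := by
  intro pos1 pos2 _
  obtain ⟨x1, y1, z1⟩ := pos1
  obtain ⟨x2, y2, z2⟩ := pos2
  unfold Spec_getCuboidPositions
  have hxle : min x1 x2 ≤ max x1 x2 := min_le_max
  have hyle : min y1 y2 ≤ max y1 y2 := min_le_max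
  have hzle : min z1 z2 ≤ max z1 z2 := min_le_max
  have hDx : (((max x1 x2 - min x1 x2 + 1).toNat : Nat) : Int) = |x1 - x2| + 1 := by
    rw [Int.toNat_of_nonneg (by omega)]
    rcases le_total x1 x2 with h | h <;>
      simp [h, abs_of_nonneg, abs_of_nonpos]
  have hDy : (((max y1 y2 - min y1 y2 + 1).toNat : Nat) : Int) = |y1 - y2| + 1 := by
    rw [Int.toNat_of_nonneg (by omega)]
    rcases le_total y1 y2 with h | h <;>
      simp [h, abs_of_nonneg, abs_of_nonpos]
  have hDz : (((max z1 z2 - min z1 z2 + 1).toNat : Nat) : Int) = |z1 - z2| + 1 := by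
    rw [Int.toNat_of_nonneg (by omega)]
    rcases le_total z1 z2 with h | h <;>
      simp [h, abs_of_nonneg, abs_of_nonpos]
  -- A as nested flatMaps over Nat ranges
  have hA : getCuboidPositions (x1, y1, z1) (x2, y2, z2)
      = (List.range (max x1 x2 - min x1 x2 + 1).toNat).flatMap (fun (a : Nat) =>
          (List.range (max y1 y2 - min y1 y2 + 1).toNat).flatMap (fun (b : Nat) =>
            (List.range (max z1 z2 - min z1 z2 + 1).toNat).map (fun (c : Nat) =>
              ((min x1 x2 + (a : Int), min y1 y2 + (b : Int), min z1 z2 + (c : Int))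
                : Int × Int × Int)))) := by
    show (((PySem.List.pyRange (min x1 x2) (max x1 x2 + 1)).foldl (fun positions x =>
      (PySem.List.pyRange (min y1 y2) (max y1 y2 + 1)).foldl (fun positions y =>
        (PySem.List.pyRange (min z1 z2) (max z1 z2 + 1)).foldl (fun positions z =>
          positions.push (x, y, z)) positions) positions)
      (#[] : Array (Int × Int × Int))).toList) = _
    have hinner : ∀ (x y : Int) (a : Array (Int × Int × Int)),
        ((PySem.List.pyRange (min z1 z2) (max z1 z2 + 1)).foldl
          (fun positions z => positions.push (x, y, z)) a).toList
          = a.toList ++ (PySem.List.pyRange (min z1 z2) (max z1 z2 + 1)).map (fun z => (x, y, z)) := by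
      intro x y a
      rw [arr_foldl_toList _ _ (fun z => [(x, y, z)]) (fun a z => by simp) a]
      simp only [List.append_cancel_left_eq]
      induction PySem.List.pyRange (min z1 z2) (max z1 z2 + 1) with
      | nil => rfl
      | cons h t ih => simp [ih]
    have hmid : ∀ (x : Int) (a : Array (Int × Int × Int)),
        ((PySem.List.pyRange (min y1 y2) (max y1 y2 + 1)).foldl (fun positions y =>
          (PySem.List.pyRange (min z1 z2) (max z1 z2 + 1)).foldl
            (fun positions z => positions.push (x, y, z)) positions) a).toList
          = a.toList ++ (PySem.List.pyRange (min y1 y2) (max y1 y2 + 1)).flatMap (fun y =>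
              (PySem.List.pyRange (min z1 z2) (max z1 z2 + 1)).map (fun z => (x, y, z))) := by
      intro x a
      exact arr_foldl_toList _ _ _ (fun a y => hinner x y a) a
    rw [arr_foldl_toList _ _ _ (fun a x => hmid x a) (#[] : Array (Int × Int × Int))]
    have ex : max x1 x2 + 1 = min x1 x2 + (((max x1 x2 - min x1 x2 + 1).toNat : Nat) : Int) := by
      rw [Int.toNat_of_nonneg (by omega)]; ring
    have ey : max y1 y2 + 1 = min y1 y2 + (((max y1 y2 - min y1 y2 + 1).toNat : Nat) : Int) := by
      rw [Int.toNat_of_nonneg (by omega)]; ring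
    have ez : max z1 z2 + 1 = min z1 z2 + (((max z1 z2 - min z1 z2 + 1).toNat : Nat) : Int) := by
      rw [Int.toNat_of_nonneg (by omega)]; ring
    rw [ex, ey, ez, pyRange_map_range, pyRange_map_range, pyRange_map_range]
    simp only [List.nil_append, List.flatMap_map, List.map_map, Function.comp_def]
  -- B as the flat decoded range
  have hB : getCuboidPositions_alt (x1, y1, z1) (x2, y2, z2)
      = (List.range ((max x1 x2 - min x1 x2 + 1).toNat * (max y1 y2 - min y1 y2 + 1).toNat
            * (max z1 z2 - min z1 z2 + 1).toNat)).map (fun (k : Nat) =>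
          ((min x1 x2 + ((k / ((max y1 y2 - min y1 y2 + 1).toNat * (max z1 z2 - min z1 z2 + 1).toNat) : Nat) : Int),
            min y1 y2 + (((k / (max z1 z2 - min z1 z2 + 1).toNat) % (max y1 y2 - min y1 y2 + 1).toNat : Nat) : Int),
            min z1 z2 + ((k % (max z1 z2 - min z1 z2 + 1).toNat : Nat) : Int)) : Int × Int × Int)) := by
    show (PySem.List.pyRange 0 ((|x1 - x2| + 1) * (|y1 - y2| + 1) * (|z1 - z2| + 1))).map (fun i =>
      (min x1 x2 + PySem.Int.floordiv i ((|y1 - y2| + 1) * (|z1 - z2| + 1)),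
       min y1 y2 + PySem.Int.mod (PySem.Int.floordiv i (|z1 - z2| + 1)) (|y1 - y2| + 1),
       min z1 z2 + PySem.Int.mod i (|z1 - z2| + 1))) = _
    have htot : (|x1 - x2| + 1) * (|y1 - y2| + 1) * (|z1 - z2| + 1)
        = (((max x1 x2 - min x1 x2 + 1).toNat * (max y1 y2 - min y1 y2 + 1).toNat
            * (max z1 z2 - min z1 z2 + 1).toNat : Nat) : Int) := by
      rw [← hDx, ← hDy, ← hDz]; push_cast; ring
    have hyz : (|y1 - y2| + 1) * (|z1 - z2| + 1)
        = (((max y1 y2 - min y1 y2 + 1).toNat * (max z1 z2 - min z1 z2 + 1).toNat : Nat) : Int) := by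
      rw [← hDy, ← hDz]; push_cast; ring
    rw [htot, hyz, ← hDy, ← hDz, PySem.List.pyRange_zero_natCast, List.map_map]
    apply List.map_congr_left
    intro k _
    simp only [Function.comp_def, PySem.Int.floordiv_natCast, PySem.Int.mod_natCast]
  rw [hA, hB, cuboid_core]
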